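-- pv_equiv track=rewrite | github.com/prendradjaja/advent-of-code-2023 | 12--hot-springs/a.py | fill_slots
-- ===== SOURCE A (Python) =====
-- import itertools
--
-- def fill_slots(template, damaged_indices):
--     '''
--     Fill the given indices with '#' and fill the rest with '.'
--
--     >>> fill_slots('??..##??', [0, 3])
--     '#...##.#'
--     '''
--     slot_values = (
--         '#' if n in damaged_indices else '.'
--         for n in itertools.count()
--     )
--     s = ''
--     for ch in template:
--         if ch == '?':
--             s += next(slot_values)
--         else:
--             s += ch
--     return s
-- ===== SOURCE B (Python) =====
-- def fill_slots(template, damaged_indices):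
--     parts = template.split('?')
--     q = len(parts) - 1
--     fills = ['.'] * q
--     for d in damaged_indices:
--         if 0 <= d < q:
--             fills[d] = '#'
--     return ''.join([parts[0]] + [f + p for f, p in zip(fills, parts[1:])])
-- ===== Notes on version B (the rewrite author's own statement) =====
-- stated objective: alternative
-- what changed: B splits the template on '?', builds a fill table by one pass over damaged_indices (marking in-range slots '#'), and joins the pieces interleaved with the table, replacing A's single character loop that tests each slot ordinal for membership in damaged_indices and concatenates strings.
import Mathlib
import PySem

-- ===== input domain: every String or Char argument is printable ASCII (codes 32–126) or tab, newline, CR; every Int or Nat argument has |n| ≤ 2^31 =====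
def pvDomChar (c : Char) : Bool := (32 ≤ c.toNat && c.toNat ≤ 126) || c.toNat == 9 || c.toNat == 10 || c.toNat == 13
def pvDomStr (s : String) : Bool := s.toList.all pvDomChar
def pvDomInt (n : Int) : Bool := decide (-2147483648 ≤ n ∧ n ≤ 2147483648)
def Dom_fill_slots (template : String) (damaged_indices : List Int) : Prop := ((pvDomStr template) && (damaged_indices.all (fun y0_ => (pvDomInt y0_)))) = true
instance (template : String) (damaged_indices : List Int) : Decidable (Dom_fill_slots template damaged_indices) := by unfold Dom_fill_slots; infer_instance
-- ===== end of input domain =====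

-- B splits the template on '?', builds a fill table by one pass over damaged_indices,
-- and joins the pieces interleaved with the table — no per-slot membership test (alternative decomposition).

-- ===== PORT A =====
-- s = ''; for ch in template: s += next(slot_values) if ch == '?' else ch
-- (the generator 'slot_values' is the running counter acc.2; the string is built as a char list, exact for +=)
def fill_slots (template : String) (damaged_indices : List Int) : String :=
  String.ofList ((template.toList.foldl
    (fun (acc : List Char × Int) ch =>
      if ch = '?' then
        (acc.1 ++ [if acc.2 ∈ damaged_indices then '#' else '.'], acc.2 + 1)
      else
        (acc.1 ++ [ch], acc.2))
    ([], 0)).1)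

-- ===== PORT B =====
-- parts = template.split('?')  (single-char separator: exactly List.splitOn on the char list)
-- q = len(parts) - 1; fills = ['.'] * q; for d in damaged_indices: if 0 <= d < q: fills[d] = '#'
-- return ''.join([parts[0]] + [f + p for f, p in zip(fills, parts[1:])])
def fill_slots_alt (template : String) (damaged_indices : List Int) : String :=
  let parts := template.toList.splitOn '?'
  let q : Int := (parts.length : Int) - 1
  let fills := damaged_indices.foldl
    (fun fs d => if 0 ≤ d ∧ d < q then PySem.List.pySetD fs d '#' else fs)
    (List.replicate (parts.length - 1) '.')
  String.ofList (parts.headD [] ++ (fills.zip (parts.drop 1)).flatMap (fun fp => fp.1 :: fp.2))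

-- ===== PRECONDITION & SPEC =====
def Spec_fill_slots (template : String) (damaged_indices : List Int) (out : String) : Prop := out = fill_slots_alt template damaged_indices
instance (template : String) (damaged_indices : List Int) (out : String) : Decidable (Spec_fill_slots template damaged_indices out) := by unfold Spec_fill_slots; infer_instance

-- ===== CLAIM (what is proved, stated in full; the proofs are below) =====
def Claim_equal_fill_slots : Prop := ∀ (template : String) (damaged_indices : List Int), Dom_fill_slots template damaged_indices → Spec_fill_slots template damaged_indices (fill_slots template damaged_indices)

-- ===== LEMMAS AND PROOFS =====

/-- the filled-in result, as a simple recursion: counter `n` is the ordinal of the next `?`. -/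
def pvGo (damaged : List Int) : List Char → Int → List Char
  | [], _ => []
  | c :: t, n =>
      if c = '?' then (if n ∈ damaged then '#' else '.') :: pvGo damaged t (n + 1)
      else c :: pvGo damaged t n

theorem pvA_fold (damaged : List Int) (cs : List Char) (acc : List Char) (n : Int) :
    (cs.foldl
      (fun (a : List Char × Int) ch =>
        if ch = '?' then (a.1 ++ [if a.2 ∈ damaged then '#' else '.'], a.2 + 1)
        else (a.1 ++ [ch], a.2)) (acc, n)).1
      = acc ++ pvGo damaged cs n := by
  induction cs generalizing acc n with
  | nil => simp [pvGo]
  | cons c t ih =>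
      by_cases hc : c = '?' <;> simp [hc, pvGo, ih, List.append_assoc]

/-- the fill-table fold: entry `k` (in range) is '#' exactly when `k ∈ damaged`. -/
theorem pvFills_get (damaged : List Int) (q : Int) (init : List Char)
    (hq : (init.length : Int) = q) (k : Nat) (hk : (k : Int) < q) :
    (damaged.foldl
        (fun fs d => if 0 ≤ d ∧ d < q then PySem.List.pySetD fs d '#' else fs) init).getD k '.'
      = if (k : Int) ∈ damaged then '#' else init.getD k '.' := by
  induction damaged generalizing init with
  | nil => simp
  | cons d ds ih =>
      simp only [List.foldl_cons]
      by_cases hd : 0 ≤ d ∧ d < q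
      · rw [if_pos hd]
        have hset : PySem.List.pySetD init d '#' = init.set d.toNat '#' := by
          rw [PySem.List.pySetD_of_nonneg] ; omega
        rw [hset, ih (init.set d.toNat '#') (by simp [hq])]
        have hdr : d.toNat < init.length := by omega
        have hgd : (init.set d.toNat '#').getD k '.'
            = if k = d.toNat then '#' else init.getD k '.' := by
          by_cases hkd : k = d.toNat
          · subst hkd
            simp [List.getD_eq_getElem?_getD, hdr]
          · have hkd' : d.toNat ≠ k := fun h => hkd h.symm
            simp [List.getD_eq_getElem?_getD, hkd, hkd']
        rw [hgd]
        by_cases hmem : (k : Int) ∈ d :: ds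
        · rw [if_pos hmem]
          rcases List.mem_cons.mp hmem with h | h
          · have hk' : k = d.toNat := by omega
            by_cases h2 : (k : Int) ∈ ds
            · rw [if_pos h2]
            · rw [if_neg h2, if_pos hk']
          · rw [if_pos h]
        · rw [if_neg hmem]
          have h2 : ¬ ((k : Int) ∈ ds) := fun h => hmem (List.mem_cons_of_mem _ h)
          have hk' : ¬ (k = d.toNat) := by
            intro h
            apply hmem
            have hkd : (k : Int) = d := by omega
            rw [hkd]
            exact List.mem_cons_self ..
          rw [if_neg h2, if_neg hk']
      · rw [if_neg hd]
        rw [ih init hq]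
        have hkd : ¬ ((k : Int) = d) := by omega
        by_cases hmem : (k : Int) ∈ ds <;> simp [hmem, hkd, List.mem_cons]

/-- splitOn is never empty. -/
theorem pvSplitOn_ne_nil (c : Char) (cs : List Char) : cs.splitOn c ≠ [] := by
  simp [List.splitOn]
  exact List.splitOnP_ne_nil _ _

theorem pvSplitOn_cons (c x : Char) (t : List Char) :
    (x :: t).splitOn c
      = if x = c then [] :: t.splitOn c else (t.splitOn c).modifyHead (x :: ·) := by
  simp only [List.splitOn, List.splitOnP_cons]
  by_cases hx : x = c <;> simp [hx]

/-- interleaving the split pieces with a correct fill table is the recursion `pvGo`. -/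
theorem pvInterleave (damaged : List Int) (cs : List Char) (F : List Char) (n : Int)
    (hlen : F.length + 1 = (cs.splitOn '?').length)
    (hF : ∀ k, k < F.length → F.getD k '.' = if (n + (k : Int)) ∈ damaged then '#' else '.') :
    (cs.splitOn '?').headD [] ++ (F.zip ((cs.splitOn '?').drop 1)).flatMap (fun fp => fp.1 :: fp.2)
      = pvGo damaged cs n := by
  induction cs generalizing F n with
  | nil =>
      have hF0 : F = [] := by
        rw [List.splitOn_nil] at hlen
        simp at hlen
        exact hlen
      subst hF0
      simp [List.splitOn_nil, pvGo]
  | cons c t ih =>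
      obtain ⟨p0, rest, hps⟩ : ∃ p0 rest, t.splitOn '?' = p0 :: rest := by
        cases h : t.splitOn '?' with
        | nil => exact absurd h (pvSplitOn_ne_nil _ _)
        | cons a b => exact ⟨a, b, rfl⟩
      by_cases hc : c = '?'
      · have hsp : (c :: t).splitOn '?' = [] :: t.splitOn '?' := by
          rw [pvSplitOn_cons]; simp [hc]
        rw [hsp] at hlen ⊢
        obtain ⟨f, F', hFc⟩ : ∃ f F', F = f :: F' := by
          cases F with
          | nil => rw [hps] at hlen; simp at hlen
          | cons a b => exact ⟨a, b, rfl⟩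
        subst hFc
        have hf : f = if n ∈ damaged then '#' else '.' := by
          have := hF 0 (by simp)
          simpa using this
        have ihh := ih F' (n + 1)
          (by simp at hlen ⊢; omega)
          (by intro k hk
              have := hF (k + 1) (by simp; omega)
              simpa [add_assoc, add_comm, add_left_comm] using this)
        rw [hps] at ihh ⊢
        simp only [List.headD, List.drop_succ_cons, List.drop_zero, List.zip_cons_cons,
          List.flatMap_cons, List.nil_append]
        simp only [List.headD] at ihh
        rw [pvGo, if_pos hc, ← ihh, ← hf]
        simp
      · have hsp : (c :: t).splitOn '?' = (c :: p0) :: rest := by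
          rw [pvSplitOn_cons, hps]; simp [hc]
        rw [hsp] at hlen ⊢
        have ihh := ih F n (by rw [hps]; simpa using hlen) hF
        rw [hps] at ihh
        simp only [List.headD, List.drop_succ_cons, List.drop_zero] at ihh ⊢
        rw [pvGo, if_neg hc, ← ihh]
        simp

/-- the fill-table fold preserves length. -/
theorem pvFills_len (damaged : List Int) (q : Int) (init : List Char) :
    (damaged.foldl
      (fun fs d => if 0 ≤ d ∧ d < q then PySem.List.pySetD fs d '#' else fs) init).length
      = init.length := by
  induction damaged generalizing init with
  | nil => rfl
  | cons d ds ih =>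
      simp only [List.foldl_cons]
      by_cases hd : 0 ≤ d ∧ d < q
      · rw [if_pos hd, ih, PySem.List.length_pySetD]
      · rw [if_neg hd, ih]

-- ===== VERDICT (by name: the statement is the Claim_ definition above) =====
theorem fill_slots_spec : Claim_equal_fill_slots := by
  intro template damaged _
  unfold Spec_fill_slots fill_slots fill_slots_alt
  rw [pvA_fold damaged template.toList [] 0]
  set cs := template.toList
  set parts := cs.splitOn '?' with hparts
  have hne : parts ≠ [] := pvSplitOn_ne_nil _ _
  have hge : 1 ≤ parts.length := List.length_pos_iff.mpr hne
  set q : Int := (parts.length : Int) - 1 with hqdef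
  set F := damaged.foldl
      (fun fs d => if 0 ≤ d ∧ d < q then PySem.List.pySetD fs d '#' else fs)
      (List.replicate (parts.length - 1) '.') with hFdef
  have hFlen : F.length = parts.length - 1 := by
    rw [hFdef, pvFills_len, List.length_replicate]
  have hq0 : ((List.replicate (parts.length - 1) '.').length : Int) = q := by
    rw [List.length_replicate, hqdef]; omega
  have hF : ∀ k, k < F.length → F.getD k '.' = if ((0 : Int) + (k : Int)) ∈ damaged then '#' else '.' := by
    intro k hk
    have hkq : (k : Int) < q := by rw [hFlen] at hk; omega
    have := pvFills_get damaged q (List.replicate (parts.length - 1) '.') hq0 k hkq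
    rw [← hFdef] at this
    rw [this]
    by_cases hmem : (k : Int) ∈ damaged <;> simp [hmem]
  have := pvInterleave damaged cs F 0 (by rw [hFlen, ← hparts]; omega) hF
  rw [← hparts] at this
  show String.ofList ([] ++ pvGo damaged cs 0)
      = String.ofList (parts.headD [] ++ (F.zip (parts.drop 1)).flatMap (fun fp => fp.1 :: fp.2))
  rw [this, List.nil_append]
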